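-- pv_equiv track=rewrite | github.com/smkang96/evolving-NN-code | crossover.py | find_forward
-- ===== SOURCE A (Python) =====
-- def find_forward(tot_txt):
-- 	tot_txt.reverse()
-- 	for_list = []
-- 	net_list = []
-- 	for line in tot_txt:
-- 		#assume super is the line before init statements start
-- 		if "super" not in line:
-- 			#ignore final return line, will be filled later with appropriate variable name
-- 			if "return" in line:
-- 				continue
-- 			else:
-- 				#remove empty lines
-- 				if not line.strip():
-- 					continue
-- 				for_list.insert(0, line.strip())
-- 		else:
-- 			break
-- 	idx = -1
-- 	for statement in for_list:
-- 		if 'forward' in statement: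
-- 			idx = for_list.index(statement)
--
-- 	net_list = for_list[:idx] #last few lines are from forward
-- 	for_list = for_list[idx + 1:] #first few lines are from NET
-- 	return for_list, net_list
-- ===== SOURCE B (Python) =====
-- def find_forward(tot_txt):
--     # Single forward pass; note: unlike the original, this does not reverse tot_txt in place.
--     start = 0
--     for i, line in enumerate(tot_txt):
--         if "super" in line:
--             start = i + 1
--     body = [l.strip() for l in tot_txt[start:] if "return" not in l and l.strip()]
--     last = None
--     for s in body:
--         if "forward" in s:
--             last = s
--     idx = body.index(last) if last is not None else -1
--     return body[idx + 1:], body[:idx]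
-- ===== Notes on version B (the rewrite author's own statement) =====
-- stated objective: faster
-- what changed: B drops A's in-place reverse, insert(0)-per-line collection and .index lookup inside the statement loop, doing one forward pass to find the last 'super' position, one filtered comprehension, and one pass tracking the last 'forward' statement followed by a single .index call.
import Mathlib
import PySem

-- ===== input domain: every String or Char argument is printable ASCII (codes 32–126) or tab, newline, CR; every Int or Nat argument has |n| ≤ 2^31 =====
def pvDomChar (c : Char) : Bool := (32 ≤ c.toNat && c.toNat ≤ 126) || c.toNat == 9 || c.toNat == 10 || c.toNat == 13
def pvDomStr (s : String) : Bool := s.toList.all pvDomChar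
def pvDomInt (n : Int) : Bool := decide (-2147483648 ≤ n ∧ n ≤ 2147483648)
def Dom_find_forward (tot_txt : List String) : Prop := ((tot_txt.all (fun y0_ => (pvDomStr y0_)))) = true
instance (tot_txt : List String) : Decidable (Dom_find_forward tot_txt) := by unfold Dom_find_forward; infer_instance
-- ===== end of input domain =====

-- B replaces A's reverse + insert(0)/break loop + index-lookup-inside-loop with one forward pass
-- (last "super" position, filter/strip, last "forward" statement, a single .index); equivalence
-- is about the RETURN value only: A reverses tot_txt in place, B does not mutate it.

-- ===== PORT A =====
-- the 'for line in tot_txt: … for_list.insert(0, …) … break' loop, carrying for_list as accumulator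
def ffCollect (acc : List String) : List String → List String
  | [] => acc
  | line :: rest =>
    if !(PySem.Str.isIn "super" line) then
      if PySem.Str.isIn "return" line then ffCollect acc rest
      else if PySem.Str.strip line = "" then ffCollect acc rest
      else ffCollect (PySem.Str.strip line :: acc) rest
    else acc  -- break

def find_forward (tot_txt : List String) : List String × List String :=
  let rev := tot_txt.reverse          -- tot_txt.reverse() (in-place in Python; return value unaffected)
  let for_list := ffCollect [] rev
  -- for statement in for_list: if 'forward' in statement: idx = for_list.index(statement)
  -- (.index never raises here: statement is a member of for_list, so getD's default is unreachable)
  let idx : Int := for_list.foldl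
    (fun idx statement =>
      if PySem.Str.isIn "forward" statement then
        ((PySem.List.index? for_list statement).getD 0 : Nat)
      else idx) (-1)
  let net_list := PySem.List.slice for_list none (some idx)
  (PySem.List.slice for_list (some (idx + 1)) none, net_list)

-- ===== PORT B =====
def find_forward_alt (tot_txt : List String) : List String × List String :=
  -- for i, line in enumerate(tot_txt): if "super" in line: start = i + 1
  let start : Int := (PySem.List.enumerate tot_txt).foldl
    (fun st (p : Int × String) => if PySem.Str.isIn "super" p.2 then p.1 + 1 else st) 0
  -- [l.strip() for l in tot_txt[start:] if "return" not in l and l.strip()]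
  let body := ((PySem.List.slice tot_txt (some start) none).filter
      (fun l => !(PySem.Str.isIn "return" l) && !(PySem.Str.strip l == ""))).map PySem.Str.strip
  -- for s in body: if "forward" in s: last = s
  let last := body.foldl (fun acc s => if PySem.Str.isIn "forward" s then some s else acc)
    (none : Option String)
  -- idx = body.index(last) if last is not None else -1  (member, so .index returns)
  let idx : Int := match last with
    | some s => ((PySem.List.index? body s).getD 0 : Nat)
    | none => -1
  (PySem.List.slice body (some (idx + 1)) none, PySem.List.slice body none (some idx))

-- ===== PRECONDITION & SPEC =====
def Spec_find_forward (tot_txt : List String) (out : List String × List String) : Prop := out = find_forward_alt tot_txt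
instance (tot_txt : List String) (out : List String × List String) : Decidable (Spec_find_forward tot_txt out) := by unfold Spec_find_forward; infer_instance

-- ===== CLAIM (what is proved, stated in full; the proofs are below) =====
def Claim_equal_find_forward : Prop := ∀ (tot_txt : List String), Dom_find_forward tot_txt → Spec_find_forward tot_txt (find_forward tot_txt)

-- ===== LEMMAS AND PROOFS =====

-- the lines B's comprehension keeps
def ffKeep (l : String) : Bool := !(PySem.Str.isIn "return" l) && !(PySem.Str.strip l == "")

-- A's collection loop = reversed kept prefix (up to the first "super") of its input, before acc
theorem ffCollect_eq (r acc : List String) :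
    ffCollect acc r =
      (((r.takeWhile (fun l => !(PySem.Str.isIn "super" l))).filter ffKeep).map
        PySem.Str.strip).reverse ++ acc := by
  induction r generalizing acc with
  | nil => simp [ffCollect]
  | cons line rest ih =>
    by_cases hs : PySem.Str.isIn "super" line <;> simp at hs <;>
      by_cases hr : PySem.Str.isIn "return" line <;> simp at hr <;>
        by_cases he : PySem.Str.strip line = "" <;>
          simp [ffCollect, hs, hr, he, ih, ffKeep]

-- B's start index, named
def ffStart (l : List String) : Int :=
  (PySem.List.enumerate l).foldl
    (fun st (p : Int × String) => if PySem.Str.isIn "super" p.2 then p.1 + 1 else st) 0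

theorem ffStart_append (l : List String) (a : String) :
    ffStart (l ++ [a]) = if PySem.Str.isIn "super" a then (l.length : Int) + 1 else ffStart l := by
  by_cases hs : PySem.Str.isIn "super" a <;> simp at hs <;>
    simp [ffStart, PySem.List.enumerate_append, PySem.List.enumerate_cons,
      PySem.List.enumerate_nil, List.foldl_append, hs]

theorem ffStart_bounds (l : List String) : 0 ≤ ffStart l ∧ ffStart l ≤ l.length := by
  induction l using List.reverseRecOn with
  | nil => simp [ffStart, PySem.List.enumerate_nil]
  | append_singleton l a ih =>
    rw [ffStart_append]
    split <;> simp <;> omega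

-- the reversed take-up-to-"super" of the reversed list is the suffix after the last "super"
theorem takeWhile_reverse_eq_drop (l : List String) :
    ((l.reverse.takeWhile (fun s => !(PySem.Str.isIn "super" s))).reverse) =
      l.drop (ffStart l).toNat := by
  induction l using List.reverseRecOn with
  | nil => simp [ffStart, PySem.List.enumerate_nil]
  | append_singleton l a ih =>
    rw [ffStart_append, List.reverse_append]
    by_cases hs : PySem.Str.isIn "super" a <;> simp at hs
    · simp [hs]
    · have hb := ffStart_bounds l
      have h1 : ((ffStart l).toNat : Int) = ffStart l := Int.toNat_of_nonneg hb.1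
      have hle : (ffStart l).toNat ≤ l.length := by omega
      simp at ih
      simp [hs, ih, List.drop_append_of_le_length hle]

-- the two idx loops agree on any list
theorem idx_loops_eq (b t : List String) :
    t.foldl
      (fun idx statement =>
        if PySem.Str.isIn "forward" statement then
          (((PySem.List.index? b statement).getD 0 : Nat) : Int)
        else idx) (-1)
    = (match t.foldl (fun acc s => if PySem.Str.isIn "forward" s then some s else acc)
          (none : Option String) with
       | some s => (((PySem.List.index? b s).getD 0 : Nat) : Int)
       | none => -1) := by
  suffices h : ∀ (i0 : Int) (a0 : Option String),
      i0 = (match a0 with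
            | some s => (((PySem.List.index? b s).getD 0 : Nat) : Int)
            | none => -1) →
      t.foldl
        (fun idx statement =>
          if PySem.Str.isIn "forward" statement then
            (((PySem.List.index? b statement).getD 0 : Nat) : Int)
          else idx) i0
      = (match t.foldl (fun acc s => if PySem.Str.isIn "forward" s then some s else acc) a0 with
         | some s => (((PySem.List.index? b s).getD 0 : Nat) : Int)
         | none => -1) by
    exact h (-1) none rfl
  induction t with
  | nil => intro i0 a0 h; simpa using h
  | cons s rest ih =>
    intro i0 a0 h
    by_cases hf : PySem.Str.isIn "forward" s
    · simp only [List.foldl_cons, hf, if_pos]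
      exact ih _ (some s) rfl
    · simp only [List.foldl_cons, hf, if_neg, Bool.false_eq_true, not_false_iff]
      exact ih _ a0 h

-- A's for_list is B's body
theorem for_list_eq_body (tot_txt : List String) :
    ffCollect [] tot_txt.reverse =
      ((PySem.List.slice tot_txt (some (ffStart tot_txt)) none).filter
        (fun l => !(PySem.Str.isIn "return" l) && !(PySem.Str.strip l == ""))).map
        PySem.Str.strip := by
  rw [ffCollect_eq, PySem.List.slice_from tot_txt (ffStart_bounds tot_txt).1,
    ← takeWhile_reverse_eq_drop, ← List.map_reverse, ← List.filter_reverse,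
    List.append_nil]
  rfl

-- ===== VERDICT (by name: the statement is the Claim_ definition above) =====
theorem find_forward_spec : Claim_equal_find_forward := by
  intro tot_txt _
  show find_forward tot_txt = find_forward_alt tot_txt
  simp only [find_forward, find_forward_alt]
  rw [show (PySem.List.enumerate tot_txt).foldl
      (fun st (p : Int × String) => if PySem.Str.isIn "super" p.2 then p.1 + 1 else st) 0
      = ffStart tot_txt from rfl]
  rw [for_list_eq_body, idx_loops_eq]
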